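-- pv_equiv track=rewrite | github.com/diegoaberrio/transcriptor_app | exporter.py | generar_documento_scrum
-- ===== SOURCE A (Python) =====
-- def generar_documento_scrum(instrucciones, num_sprints):
--     """
--     Genera un documento SCRUM a partir de una lista de instrucciones y el número de sprints.
--     Divide las instrucciones de forma equitativa entre los sprints.
--
--     Parámetros:
--       instrucciones (list): Lista de instrucciones extraídas.
--       num_sprints (int): Número de sprints en los que se dividirán las instrucciones.
--
--     Retorna:
--       str: Documento SCRUM formateado.
--     """
--     if num_sprints < 1:
--         num_sprints = 1
--     total = len(instrucciones)
--     if total == 0: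
--         return "No hay instrucciones para generar el documento SCRUM."
--
--     # Calcular el tamaño base y el residuo para distribuir equitativamente
--     sprint_size = total // num_sprints
--     remainder = total % num_sprints
--
--     sprints = {}
--     start = 0
--     for i in range(num_sprints):
--         extra = 1 if i < remainder else 0
--         end = start + sprint_size + extra
--         sprints[f"Sprint {i+1}"] = instrucciones[start:end]
--         start = end
--
--     documento = ""
--     for sprint, tareas in sprints.items():
--         documento += f"{sprint}:\n"
--         for tarea in tareas:
--             documento += f"  - {tarea}\n"
--         documento += "\n"
--     return documento
-- ===== SOURCE B (Python) =====
-- def generar_documento_scrum(instrucciones, num_sprints):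
--     if num_sprints < 1:
--         num_sprints = 1
--     total = len(instrucciones)
--     if total == 0:
--         return "No hay instrucciones para generar el documento SCRUM."
--     base = total // num_sprints
--     rem = total % num_sprints
--     # inverse mapping: for each instruction index k, the sprint that owns it
--     cuerpos = [""] * num_sprints
--     for k, tarea in enumerate(instrucciones):
--         if k < rem * (base + 1):
--             s = k // (base + 1)
--         else:
--             s = rem + (k - rem * (base + 1)) // base
--         cuerpos[s] += f"  - {tarea}\n"
--     return ''.join(f"Sprint {i+1}:\n{c}\n" for i, c in enumerate(cuerpos))
-- ===== Notes on version B (the rewrite author's own statement) =====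
-- stated objective: alternative
-- what changed: B inverts the decomposition: instead of iterating sprints and slicing the list (A threads a running start and fills a dict of slices), B makes a single pass over the instructions, computes for each instruction index k its owning sprint by a closed-form inverse (k//(base+1) in the first rem*(base+1) indices, else rem+(k-rem*(base+1))//base), accumulates formatted lines into a per-sprint body array, and joins the rendered blocks.
import Mathlib
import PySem

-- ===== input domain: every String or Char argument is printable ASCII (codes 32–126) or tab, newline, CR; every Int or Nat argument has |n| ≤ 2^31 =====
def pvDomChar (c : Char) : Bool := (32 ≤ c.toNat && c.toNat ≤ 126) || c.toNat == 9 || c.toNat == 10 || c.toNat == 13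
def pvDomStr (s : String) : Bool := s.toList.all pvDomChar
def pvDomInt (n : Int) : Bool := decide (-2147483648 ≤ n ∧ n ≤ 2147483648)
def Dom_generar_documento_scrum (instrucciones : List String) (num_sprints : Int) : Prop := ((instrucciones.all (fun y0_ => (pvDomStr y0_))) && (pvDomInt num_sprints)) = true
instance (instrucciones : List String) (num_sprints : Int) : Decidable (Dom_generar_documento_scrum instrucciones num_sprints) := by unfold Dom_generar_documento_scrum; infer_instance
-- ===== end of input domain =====

-- B inverts A's decomposition: one pass over the instructions assigning each index its
-- sprint by a closed-form inverse, instead of A's per-sprint slicing with a running start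
-- (objective: alternative algorithm, same cost; return values proved equal on the whole domain).

-- ===== PORT A =====
def generar_documento_scrum (instrucciones : List String) (num_sprints : Int) : String :=
  let ns : Int := if num_sprints < 1 then 1 else num_sprints
  let total : Int := instrucciones.length
  if total = 0 then "No hay instrucciones para generar el documento SCRUM."
  else
    let sprint_size : Int := PySem.Int.floordiv total ns
    let remainder : Int := PySem.Int.mod total ns
    let st :=
      (PySem.List.pyRange 0 ns 1).foldl
        (fun (st : PySem.Dict String (List String) × Int) i =>
          (st.1.insert ("Sprint " ++ PySem.Int.toStr (i + 1))
              (PySem.List.slice instrucciones (some st.2)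
                (some (st.2 + sprint_size + (if i < remainder then (1 : Int) else 0)))),
           st.2 + sprint_size + (if i < remainder then (1 : Int) else 0)))
        (PySem.Dict.mk [], 0)
    st.1.items.foldl
      (fun documento p =>
        (p.2.foldl (fun d tarea => d ++ "  - " ++ tarea ++ "\n") (documento ++ p.1 ++ ":\n")) ++ "\n")
      ""

-- ===== PORT B =====
def generar_documento_scrum_alt (instrucciones : List String) (num_sprints : Int) : String :=
  let ns : Int := if num_sprints < 1 then 1 else num_sprints
  let total : Int := instrucciones.length
  if total = 0 then "No hay instrucciones para generar el documento SCRUM."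
  else
    let base : Int := PySem.Int.floordiv total ns
    let rem : Int := PySem.Int.mod total ns
    let cuerpos :=
      (PySem.List.enumerate instrucciones 0).foldl
        (fun (cuerpos : List String) kt =>
          let s : Int :=
            if kt.1 < rem * (base + 1) then PySem.Int.floordiv kt.1 (base + 1)
            else rem + PySem.Int.floordiv (kt.1 - rem * (base + 1)) base
          PySem.List.pySetD cuerpos s
            (PySem.List.pyGetD cuerpos s "" ++ "  - " ++ kt.2 ++ "\n"))
        (List.replicate ns.toNat "")
    PySem.Str.join ""
      ((PySem.List.enumerate cuerpos 0).map
        (fun p => "Sprint " ++ PySem.Int.toStr (p.1 + 1) ++ ":\n" ++ p.2 ++ "\n"))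

-- ===== PRECONDITION & SPEC =====
def Spec_generar_documento_scrum (instrucciones : List String) (num_sprints : Int) (out : String) : Prop := out = generar_documento_scrum_alt instrucciones num_sprints
instance (instrucciones : List String) (num_sprints : Int) (out : String) : Decidable (Spec_generar_documento_scrum instrucciones num_sprints out) := by unfold Spec_generar_documento_scrum; infer_instance

-- ===== CLAIM (what is proved, stated in full; the proofs are below) =====
def Claim_equal_generar_documento_scrum : Prop := ∀ (instrucciones : List String) (num_sprints : Int), Dom_generar_documento_scrum instrucciones num_sprints → Spec_generar_documento_scrum instrucciones num_sprints (generar_documento_scrum instrucciones num_sprints)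

-- ===== LEMMAS AND PROOFS =====

-- the decimal digit string of n, most significant first (the spine of Nat.toDigits 10)
def pvDig (n : Nat) : List Char :=
  if h : n < 10 then [Nat.digitChar n]
  else pvDig (n / 10) ++ [Nat.digitChar (n % 10)]
decreasing_by exact Nat.div_lt_self (by omega) (by omega)

def pvVal (l : List Char) : Nat := l.foldl (fun a c => a * 10 + (c.toNat - 48)) 0

lemma pvToDigitsCore_succ (f n : Nat) (ds : List Char) :
    Nat.toDigitsCore 10 (f + 1) n ds =
      if n / 10 = 0 then Nat.digitChar (n % 10) :: ds
      else Nat.toDigitsCore 10 f (n / 10) (Nat.digitChar (n % 10) :: ds) := rfl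

lemma pvCore (f : Nat) : ∀ (n : Nat) (ds : List Char), 0 < f → n < 10 ^ f →
    Nat.toDigitsCore 10 f n ds = pvDig n ++ ds := by
  induction f with
  | zero => intro n ds h; omega
  | succ f ih =>
    intro n ds _ hn
    rw [pvToDigitsCore_succ]
    by_cases h0 : n / 10 = 0
    · have hlt : n < 10 := by omega
      rw [if_pos h0, pvDig, dif_pos hlt]
      have : n % 10 = n := by omega
      rw [this]; rfl
    · have h10 : 10 ≤ n := by omega
      have hf : 0 < f := by
        rcases Nat.eq_zero_or_pos f with rfl | hf
        · simp at hn; omega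
        · exact hf
      have hdiv : n / 10 < 10 ^ f := by
        apply Nat.div_lt_of_lt_mul
        have h' := hn; rw [pow_succ] at h'; omega
      rw [if_neg h0, ih (n / 10) _ hf hdiv]
      conv_rhs => rw [pvDig]
      rw [dif_neg (by omega : ¬ n < 10)]
      simp

lemma pvToDigits_eq (n : Nat) : Nat.toDigits 10 n = pvDig n := by
  have h1 : n < 10 ^ (n + 1) := by
    calc n < 10 ^ n := Nat.lt_pow_self (by norm_num)
    _ ≤ 10 ^ (n + 1) := Nat.pow_le_pow_right (by norm_num) (Nat.le_succ n)
  have := pvCore (n + 1) n [] (Nat.succ_pos n) h1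
  simpa [Nat.toDigits] using this

lemma pvVal_digit (d : Nat) (h : d < 10) : (Nat.digitChar d).toNat - 48 = d := by
  interval_cases d <;> rfl

lemma pvVal_append (l : List Char) (c : Char) :
    pvVal (l ++ [c]) = pvVal l * 10 + (c.toNat - 48) := by
  simp [pvVal, List.foldl_append]

lemma pvVal_pvDig (n : Nat) : pvVal (pvDig n) = n := by
  induction n using Nat.strong_induction_on with
  | _ n ih =>
    by_cases h : n < 10
    · rw [pvDig, dif_pos h]
      simp [pvVal, pvVal_digit n h]
    · rw [pvDig, dif_neg h, pvVal_append,
        ih (n / 10) (Nat.div_lt_self (by omega) (by omega)),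
        pvVal_digit _ (Nat.mod_lt _ (by omega))]
      omega

lemma pvToChars_inj (a b : Int) (ha : 0 ≤ a) (hb : 0 ≤ b)
    (h : PySem.Int.toChars a = PySem.Int.toChars b) : a = b := by
  unfold PySem.Int.toChars at h
  rw [if_neg (by omega), if_neg (by omega), pvToDigits_eq, pvToDigits_eq] at h
  have hv := congrArg pvVal h
  rw [pvVal_pvDig, pvVal_pvDig] at hv
  omega

lemma pvKey_inj (i j : Int) (hi : 0 ≤ i) (hj : 0 ≤ j)
    (h : ("Sprint " ++ PySem.Int.toStr (i + 1)) = ("Sprint " ++ PySem.Int.toStr (j + 1))) :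
    i = j := by
  have h2 := congrArg String.toList h
  simp only [String.toList_append] at h2
  have h3 := List.append_cancel_left h2
  rw [PySem.Int.toList_toStr, PySem.Int.toList_toStr] at h3
  have := pvToChars_inj (i + 1) (j + 1) (by omega) (by omega) h3
  omega

lemma pvJoin_nil : PySem.Str.join "" ([] : List String) = "" := by
  apply String.toList_inj.mp
  simp [PySem.Str.toList_join, PySem.Chars.join_nil]

lemma pvJoin_cons (p : String) (rest : List String) :
    PySem.Str.join "" (p :: rest) = p ++ PySem.Str.join "" rest := by
  apply String.toList_inj.mp
  cases rest with
  | nil => simp [PySem.Str.toList_join, PySem.Chars.join_singleton, PySem.Chars.join_nil]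
  | cons q t =>
    simp [PySem.Str.toList_join, PySem.Chars.join_cons_cons]

lemma pvJoin_append (l1 l2 : List String) :
    PySem.Str.join "" (l1 ++ l2) = PySem.Str.join "" l1 ++ PySem.Str.join "" l2 := by
  induction l1 with
  | nil => simp [pvJoin_nil]
  | cons x t ih => simp [pvJoin_cons, ih, String.append_assoc]

lemma pvFoldlJoin {α : Type} (f : α → String) (l : List α) (s : String) :
    l.foldl (fun acc x => acc ++ f x) s = s ++ PySem.Str.join "" (l.map f) := by
  induction l generalizing s with
  | nil => simp [pvJoin_nil]
  | cons x t ih => simp [List.foldl_cons, ih, pvJoin_cons, String.append_assoc]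

-- the (key, slice) pair A stores for sprint index j, with closed-form boundaries
def pvEntry (instr : List String) (q r : Int) (j : Nat) : String × List String :=
  ("Sprint " ++ PySem.Int.toStr ((j : Int) + 1),
   PySem.List.slice instr (some ((j : Int) * q + min (j : Int) r))
     (some (((j : Int) + 1) * q + min ((j : Int) + 1) r)))

lemma pvLoop (instr : List String) (q r : Int) (hr : 0 ≤ r) (n : Nat) :
    ((List.range n).map (fun k : Nat => (k : Int))).foldl
        (fun (st : PySem.Dict String (List String) × Int) i =>
          (st.1.insert ("Sprint " ++ PySem.Int.toStr (i + 1))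
              (PySem.List.slice instr (some st.2)
                (some (st.2 + q + (if i < r then (1 : Int) else 0)))),
           st.2 + q + (if i < r then (1 : Int) else 0)))
        (PySem.Dict.mk [], 0)
      = (PySem.Dict.mk ((List.range n).map (pvEntry instr q r)),
         (n : Int) * q + min (n : Int) r) := by
  induction n with
  | zero => simp [min_eq_left hr]
  | succ n ih =>
    rw [List.range_succ, List.map_append, List.map_append, List.foldl_append, ih]
    have hkey : ∀ j : Nat, j < n →
        ("Sprint " ++ PySem.Int.toStr ((j : Int) + 1)) ≠
          ("Sprint " ++ PySem.Int.toStr ((n : Int) + 1)) := by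
      intro j hj heq
      have := pvKey_inj _ _ (Int.natCast_nonneg j) (Int.natCast_nonneg n) heq
      omega
    have hcont : (PySem.Dict.mk ((List.range n).map (pvEntry instr q r))).contains
        ("Sprint " ++ PySem.Int.toStr ((n : Int) + 1)) = false := by
      simp only [PySem.Dict.contains, List.any_eq_false]
      intro p hp
      simp only [List.mem_map, List.mem_range] at hp
      obtain ⟨j, hj, rfl⟩ := hp
      simp only [pvEntry, beq_iff_eq]
      exact hkey j hj
    have he : ((n : Int) * q + min (n : Int) r) + q + (if (n : Int) < r then (1 : Int) else 0)
        = ((n : Int) + 1) * q + min ((n : Int) + 1) r := by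
      by_cases hc : (n : Int) < r
      · rw [if_pos hc, min_eq_left (by omega), min_eq_left (by omega)]; ring
      · rw [if_neg hc, min_eq_right (by omega), min_eq_right (by omega)]; ring
    simp only [List.map_cons, List.map_nil, List.foldl_cons, List.foldl_nil]
    rw [PySem.Dict.insert]
    simp only [hcont, Bool.false_eq_true, if_false, he]
    have hent : pvEntry instr q r n =
        ("Sprint " ++ PySem.Int.toStr ((n : Int) + 1),
         PySem.List.slice instr (some ((n : Int) * q + min (n : Int) r))
           (some (((n : Int) + 1) * q + min ((n : Int) + 1) r))) := rfl
    rw [hent]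
    push_cast
    rfl

lemma pvDoc (L : List (String × List String)) :
    L.foldl
        (fun documento p =>
          (p.2.foldl (fun d tarea => d ++ "  - " ++ tarea ++ "\n") (documento ++ p.1 ++ ":\n")) ++ "\n")
        ""
      = PySem.Str.join "" (L.map (fun p =>
          p.1 ++ (":\n" ++ (PySem.Str.join "" (p.2.map (fun t => "  - " ++ (t ++ "\n"))) ++ "\n")))) := by
  have hstep : (fun (documento : String) (p : String × List String) =>
      (p.2.foldl (fun d tarea => d ++ "  - " ++ tarea ++ "\n") (documento ++ p.1 ++ ":\n")) ++ "\n")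
      = (fun documento p => documento ++
          (p.1 ++ (":\n" ++ (PySem.Str.join "" (p.2.map (fun t => "  - " ++ (t ++ "\n"))) ++ "\n")))) := by
    funext documento p
    have hl : (fun (d t : String) => d ++ "  - " ++ t ++ "\n")
        = (fun d t => d ++ ("  - " ++ (t ++ "\n"))) := by
      funext d t; simp [String.append_assoc]
    rw [hl, pvFoldlJoin]
    simp [String.append_assoc]
  rw [hstep, pvFoldlJoin, String.empty_append]

-- ---- B-side machinery: Nat-level chunk boundaries and the per-index sprint map ----

def pvStart (q r j : Nat) : Nat := j * q + min j r

def pvLine (t : String) : String := "  - " ++ (t ++ "\n")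

-- the partial body of sprint j after the first m instructions have been distributed
def pvPB (instr : List String) (q r m j : Nat) : String :=
  PySem.Str.join ""
    (((instr.drop (pvStart q r j)).take (min (pvStart q r (j+1)) m - pvStart q r j)).map pvLine)

def pvSprN (q r k : Nat) : Nat :=
  if k < r * (q + 1) then k / (q + 1) else r + (k - r * (q + 1)) / q

lemma pvStart_mono (q r : Nat) {a b : Nat} (h : a ≤ b) : pvStart q r a ≤ pvStart q r b := by
  unfold pvStart
  have h1 := Nat.mul_le_mul_right q h
  have h2 : min a r ≤ min b r := min_le_min h le_rfl
  omega

lemma pvStart_top (T N : Nat) (hN : 0 < N) : pvStart (T / N) (T % N) N = T := by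
  unfold pvStart
  have h1 := Nat.div_add_mod T N
  have h2 : T % N < N := Nat.mod_lt _ hN
  have h3 : min N (T % N) = T % N := by omega
  rw [h3]
  nlinarith [Nat.div_add_mod T N]

lemma pvSpr_bounds (T N q r m : Nat) (hN : 0 < N) (hq : q = T / N) (hr : r = T % N)
    (hm : m < T) :
    pvSprN q r m < N ∧ pvStart q r (pvSprN q r m) ≤ m ∧ m < pvStart q r (pvSprN q r m + 1) := by
  have hTqr : N * q + r = T := by rw [hq, hr]; exact Nat.div_add_mod T N
  have hrN : r < N := by rw [hr]; exact Nat.mod_lt _ hN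
  unfold pvSprN pvStart
  by_cases h : m < r * (q + 1)
  · rw [if_pos h]
    set e := m / (q + 1) with he
    have h1 : (q + 1) * e + m % (q + 1) = m := Nat.div_add_mod m (q + 1)
    have h2 : m % (q + 1) < q + 1 := Nat.mod_lt _ (by omega)
    have her : e < r := by
      rw [he]
      exact (Nat.div_lt_iff_lt_mul (by omega)).mpr h
    have hmin1 : min e r = e := by omega
    have hmin2 : min (e + 1) r = e + 1 := by omega
    rw [hmin1, hmin2]
    refine ⟨by omega, ?_, ?_⟩
    · have : e * q + e = (q + 1) * e := by ring
      omega
    · have : (e + 1) * q + (e + 1) = (q + 1) * e + (q + 1) := by ring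
      omega
  · rw [if_neg h]
    push_neg at h
    have hq0 : 0 < q := by
      rcases Nat.eq_zero_or_pos q with rfl | hq0
      · exfalso; omega
      · exact hq0
    set d := m - r * (q + 1) with hd
    set e := d / q with he
    have h1 : q * e + d % q = d := Nat.div_add_mod d q
    have h2 : d % q < q := Nat.mod_lt _ hq0
    have hdT : d < (N - r) * q := by
      have e1 : (N - r) * q + r * q = N * q := by
        rw [← Nat.add_mul, Nat.sub_add_cancel (le_of_lt hrN)]
      have e2 : r * (q + 1) = r * q + r := by ring
      omega
    have heN : e < N - r := by
      rw [he]
      exact (Nat.div_lt_iff_lt_mul hq0).mpr hdT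
    have hmin1 : min (r + e) r = r := min_eq_right (Nat.le_add_right r e)
    have hmin2 : min (r + e + 1) r = r :=
      min_eq_right (by rw [Nat.add_assoc]; exact Nat.le_add_right r (e + 1))
    rw [hmin1, hmin2]
    refine ⟨by omega, ?_, ?_⟩
    · have : (r + e) * q + r = r * (q + 1) + q * e := by ring
      omega
    · have : (r + e + 1) * q + r = r * (q + 1) + q * e + q := by ring
      omega

lemma pvEnumAppend {α : Type} (xs ys : List α) (s : Int) :
    PySem.List.enumerate (xs ++ ys) s
      = PySem.List.enumerate xs s ++ PySem.List.enumerate ys (s + xs.length) := by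
  induction xs generalizing s with
  | nil => simp [PySem.List.enumerate_nil]
  | cons x t ih =>
    simp only [List.cons_append, PySem.List.enumerate_cons, ih, List.length_cons]
    congr 2
    push_cast
    ring

lemma pvSetMapRange {α : Type} (N j0 : Nat) (f : Nat → α) (v : α) (h : j0 < N) :
    ((List.range N).map f).set j0 v
      = (List.range N).map (fun j => if j = j0 then v else f j) := by
  apply List.ext_getElem
  · simp
  · intro n h1 h2
    simp only [List.length_set, List.length_map, List.length_range] at h1 h2
    rw [List.getElem_set]
    simp only [List.getElem_map, List.getElem_range]
    split_ifs with hc hc2 hc3 <;> first | rfl | omega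

lemma pvGetDMapRange {α : Type} (N j0 : Nat) (f : Nat → α) (d : α) (h : j0 < N) :
    ((List.range N).map f).getD j0 d = f j0 := by
  rw [List.getD_eq_getElem _ _ (by simp [h])]
  simp

lemma pvS_cast (q r m : Nat) :
    (if (m : Int) < (r : Int) * ((q : Int) + 1) then PySem.Int.floordiv (m : Int) ((q : Int) + 1)
     else (r : Int) + PySem.Int.floordiv ((m : Int) - (r : Int) * ((q : Int) + 1)) (q : Int))
      = ((pvSprN q r m : Nat) : Int) := by
  unfold pvSprN
  by_cases h : m < r * (q + 1)
  · rw [if_pos (by exact_mod_cast h), if_pos h]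
    have : ((q : Int) + 1) = ((q + 1 : Nat) : Int) := by push_cast; ring
    rw [this, PySem.Int.floordiv_natCast]
  · rw [if_neg (by exact_mod_cast h), if_neg h]
    have h' : r * (q + 1) ≤ m := by omega
    have : (m : Int) - (r : Int) * ((q : Int) + 1) = ((m - r * (q + 1) : Nat) : Int) := by
      rw [Nat.cast_sub h']; push_cast; ring
    rw [this, PySem.Int.floordiv_natCast]
    push_cast
    ring

lemma pvTake_snoc (instr : List String) (st m : Nat) (hst : st ≤ m) (hm : m < instr.length) :
    (instr.drop st).take (m + 1 - st) = (instr.drop st).take (m - st) ++ [instr[m]] := by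
  have h1 : m + 1 - st = (m - st) + 1 := by omega
  rw [h1, List.take_succ]
  have h2 : (instr.drop st)[m - st]? = some instr[m] := by
    rw [List.getElem?_drop, show st + (m - st) = m from by omega]
    exact List.getElem?_eq_getElem hm
  rw [h2]
  rfl

lemma pvFold (instr : List String) (N q r : Nat) (hN : 0 < N)
    (hq : q = instr.length / N) (hr : r = instr.length % N) :
    ∀ m, m ≤ instr.length →
      (PySem.List.enumerate (instr.take m) 0).foldl
        (fun (cuer : List String) kt =>
          PySem.List.pySetD cuer
            (if kt.1 < (r : Int) * ((q : Int) + 1) then PySem.Int.floordiv kt.1 ((q : Int) + 1)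
             else (r : Int) + PySem.Int.floordiv (kt.1 - (r : Int) * ((q : Int) + 1)) (q : Int))
            (PySem.List.pyGetD cuer
              (if kt.1 < (r : Int) * ((q : Int) + 1) then PySem.Int.floordiv kt.1 ((q : Int) + 1)
               else (r : Int) + PySem.Int.floordiv (kt.1 - (r : Int) * ((q : Int) + 1)) (q : Int)) ""
              ++ "  - " ++ kt.2 ++ "\n"))
        (List.replicate N "")
      = (List.range N).map (pvPB instr q r m) := by
  intro m
  induction m with
  | zero =>
    intro _
    simp only [List.take_zero, PySem.List.enumerate_nil, List.foldl_nil]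
    have : pvPB instr q r 0 = fun _ => "" := by
      funext j
      unfold pvPB
      have : min (pvStart q r (j+1)) 0 - pvStart q r j = 0 := by omega
      rw [this]
      simp [pvJoin_nil]
    rw [this]
    rw [List.map_const']
    simp
  | succ m ih =>
    intro hm1
    have hm : m < instr.length := by omega
    obtain ⟨j0lt, hle, hlt⟩ := pvSpr_bounds instr.length N q r m hN hq hr hm
    rw [List.take_succ, List.getElem?_eq_getElem hm]
    simp only [Option.toList_some]
    rw [pvEnumAppend, List.foldl_append, ih (by omega)]
    simp only [PySem.List.enumerate_cons, PySem.List.enumerate_nil, List.foldl_cons, List.foldl_nil]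
    have hlen : (0 : Int) + (instr.take m).length = (m : Int) := by
      simp [List.length_take]; omega
    rw [hlen, pvS_cast q r m]
    rw [PySem.List.pySetD_natCast, PySem.List.pyGetD_natCast]
    rw [pvGetDMapRange N (pvSprN q r m) _ _ j0lt]
    rw [pvSetMapRange N (pvSprN q r m) _ _ j0lt]
    apply List.map_congr_left
    intro j hj
    simp only [List.mem_range] at hj
    by_cases hc : j = pvSprN q r m
    · rw [if_pos hc, hc]
      unfold pvPB
      have hmin1 : min (pvStart q r (pvSprN q r m + 1)) m = m := by omega
      have hmin2 : min (pvStart q r (pvSprN q r m + 1)) (m + 1) = m + 1 := by omega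
      rw [hmin1, hmin2, pvTake_snoc instr (pvStart q r (pvSprN q r m)) m hle hm]
      rw [List.map_append, pvJoin_append]
      simp [pvLine, pvJoin_cons, pvJoin_nil, String.append_assoc]
    · rw [if_neg hc]
      unfold pvPB
      have hcount : min (pvStart q r (j + 1)) m - pvStart q r j
          = min (pvStart q r (j + 1)) (m + 1) - pvStart q r j := by
        rcases Nat.lt_or_ge j (pvSprN q r m) with hlt2 | hge
        · have h1 : pvStart q r (j + 1) ≤ pvStart q r (pvSprN q r m) := pvStart_mono q r hlt2
          omega
        · have hgt : pvSprN q r m < j := by omega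
          have h1 : pvStart q r (pvSprN q r m + 1) ≤ pvStart q r j := pvStart_mono q r hgt
          have h2 : pvStart q r j ≤ pvStart q r (j + 1) := pvStart_mono q r (Nat.le_succ j)
          omega
      rw [hcount]

lemma pvEnumMap {α β : Type} [Inhabited α] (h : Int → α → β) :
    ∀ (l : List α) (s : Int),
      (PySem.List.enumerate l s).map (fun p => h p.1 p.2)
        = (List.range l.length).map (fun (j : Nat) => h (s + (j : Int)) (l.getD j default)) := by
  intro l
  induction l with
  | nil => intro s; simp [PySem.List.enumerate_nil]
  | cons x t ih =>
    intro s
    rw [PySem.List.enumerate_cons, List.map_cons, ih (s + 1)]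
    rw [List.length_cons, List.range_succ_eq_map, List.map_cons, List.map_map]
    congr 1
    · simp
    · apply List.map_congr_left
      intro j _
      simp only [Function.comp_apply, List.getD_cons_succ]
      have hcast : s + 1 + (j : Int) = s + ((j.succ : Nat) : Int) := by push_cast; ring
      rw [hcast]

-- ===== VERDICT (by name: the statement is the Claim_ definition above) =====
theorem generar_documento_scrum_spec : Claim_equal_generar_documento_scrum := by
  intro instr nsp _
  unfold Spec_generar_documento_scrum generar_documento_scrum generar_documento_scrum_alt
  dsimp only
  by_cases h0 : (instr.length : Int) = 0
  · rw [if_pos h0, if_pos h0]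
  · rw [if_neg h0, if_neg h0]
    have hns : 0 < (if nsp < 1 then (1 : Int) else nsp) := by split <;> omega
    set ns : Int := if nsp < 1 then (1 : Int) else nsp with hns_def
    set N : Nat := ns.toNat with hN_def
    have hNpos : 0 < N := by rw [hN_def]; omega
    have hnsN : ns = (N : Int) := by rw [hN_def]; omega
    set T : Nat := instr.length with hT_def
    set q : Nat := T / N with hq_def
    set r : Nat := T % N with hr_def
    have hqI : PySem.Int.floordiv (T : Int) ns = ((q : Nat) : Int) := by
      rw [hnsN, hq_def]; exact PySem.Int.floordiv_natCast T N
    have hrI : PySem.Int.mod (T : Int) ns = ((r : Nat) : Int) := by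
      rw [hnsN, hr_def]; exact PySem.Int.mod_natCast T N
    rw [hqI, hrI]
    -- A side: closed-form dict then rendering
    have hrange : PySem.List.pyRange 0 ns 1 = (List.range N).map (fun k : Nat => (k : Int)) := by
      conv_lhs => rw [hnsN]
      exact PySem.List.pyRange_zero_natCast _
    rw [hrange, pvLoop instr (q : Int) (r : Int) (Int.natCast_nonneg r) N]
    show ((List.range N).map (pvEntry instr (q : Int) (r : Int))).foldl _ "" = _
    rw [pvDoc, List.map_map]
    -- B side: fold to per-sprint bodies, then rendering
    have hFold := pvFold instr N q r hNpos hq_def hr_def T (le_of_eq hT_def)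
    rw [hT_def, List.take_length] at hFold
    rw [hFold,
      pvEnumMap (fun i c => "Sprint " ++ PySem.Int.toStr (i + 1) ++ ":\n" ++ c ++ "\n")
        ((List.range N).map (pvPB instr q r instr.length)) 0]
    simp only [List.length_map, List.length_range]
    apply congrArg
    apply List.map_congr_left
    intro j hj
    simp only [List.mem_range] at hj
    rw [pvGetDMapRange N j _ _ hj]
    -- both sides are the block of sprint j; equal up to append associativity
    simp only [Function.comp, pvEntry]
    unfold pvPB
    have hpv : pvLine = fun t => "  - " ++ (t ++ "\n") := rfl
    rw [hpv]
    have hb1 : (j : Int) * (q : Int) + min (j : Int) (r : Int) = ((pvStart q r j : Nat) : Int) := by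
      unfold pvStart; push_cast; ring_nf
    have hb2 : ((j : Int) + 1) * (q : Int) + min ((j : Int) + 1) (r : Int)
        = ((pvStart q r (j + 1) : Nat) : Int) := by
      unfold pvStart; push_cast; ring_nf
    have hTop : pvStart q r (j + 1) ≤ instr.length := by
      calc pvStart q r (j + 1) ≤ pvStart q r N := pvStart_mono q r (by omega)
      _ = instr.length := by
          rw [hq_def, hr_def, hT_def]; exact pvStart_top instr.length N hNpos
    have hminT : min (pvStart q r (j + 1)) instr.length = pvStart q r (j + 1) := by omega
    rw [hb1, hb2, PySem.List.slice_natCast, hminT]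
    have : (0 : Int) + (j : Int) = (j : Int) := by ring
    rw [this]
    simp [String.append_assoc]
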